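-- pv_equiv track=rewrite | github.com/elgenio123/hackathon-data-science | helpers.py | concatenate_lists
-- ===== SOURCE A (Python) =====
-- def concatenate_lists(list300, list140, list160):
--     result = []
--
--     len140 = len(list140)
--     len160 = len(list160)
--
--     for i in range(len(list300)):
--         if i < len140:
--             concatenated = list140[i] +' '+ list300[i]
--         else:
--             index_in_160 = i - len140
--             if index_in_160 < len160:
--                 concatenated = list160[index_in_160] +' '+ list300[i]
--             else:
--                 concatenated = list300[i]
--
--         result.append(concatenated)
--
--     return result
-- ===== SOURCE B (Python) =====
-- def concatenate_lists(list300, list140, list160):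
--     it = iter(list300)
--     result = []
--     for prefix in list140:
--         x = next(it, None)
--         if x is None:
--             break
--         result.append(prefix + ' ' + x)
--     else:
--         for prefix in list160:
--             x = next(it, None)
--             if x is None:
--                 break
--             result.append(prefix + ' ' + x)
--     result.extend(it)
--     return result
-- ===== Notes on version B (the rewrite author's own statement) =====
-- stated objective: alternative
-- what changed: Replaces A's single indexed loop with offset arithmetic and nested branches by consuming list300 through one iterator with two sequential loops over list140 then list160 (no indices at all), then extending with whatever the iterator still holds.
import Mathlib
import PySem

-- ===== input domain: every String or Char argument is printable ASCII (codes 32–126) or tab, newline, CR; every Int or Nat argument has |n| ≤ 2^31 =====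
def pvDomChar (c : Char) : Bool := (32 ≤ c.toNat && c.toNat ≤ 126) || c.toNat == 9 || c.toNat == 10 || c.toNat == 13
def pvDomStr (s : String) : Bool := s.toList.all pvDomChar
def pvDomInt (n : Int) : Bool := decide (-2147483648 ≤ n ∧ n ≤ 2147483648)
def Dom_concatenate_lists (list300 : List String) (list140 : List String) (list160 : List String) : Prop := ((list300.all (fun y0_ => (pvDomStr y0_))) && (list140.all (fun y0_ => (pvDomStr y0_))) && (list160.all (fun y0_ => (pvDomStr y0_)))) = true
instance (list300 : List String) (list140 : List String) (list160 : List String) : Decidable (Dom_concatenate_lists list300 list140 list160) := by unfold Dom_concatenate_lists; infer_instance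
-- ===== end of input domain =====

-- B consumes list300 through one "iterator" (the remaining list) with two sequential
-- prefix loops instead of A's indexed loop with offset arithmetic; same cost, different decomposition.

-- ===== PORT A =====
-- Python indices i, i - len140 are nonnegative and are only read when in range
-- (i < len140, index_in_160 < len160, i < len(list300)), so `getD _ ""` is exact here.
def concatenate_lists (list300 : List String) (list140 : List String) (list160 : List String) : List String :=
  let len140 := list140.length
  let len160 := list160.length
  (List.range list300.length).foldl (fun result i =>
    let concatenated :=
      if i < len140 then
        list140.getD i "" ++ " " ++ list300.getD i ""
      else
        let index_in_160 := i - len140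
        if index_in_160 < len160 then
          list160.getD index_in_160 "" ++ " " ++ list300.getD i ""
        else
          list300.getD i ""
    result ++ [concatenated]
  ) []

-- ===== PORT B =====
-- One phase of Source B: a `for prefix in prefixes` loop pulling from the iterator `it`
-- (modelled as the list of not-yet-consumed elements of list300), appending to `result`.
-- Returns (result, remaining iterator, whether the loop exited via `break`).
def pvPhase (prefixes : List String) (it : List String) (result : List String) :
    List String × List String × Bool :=
  match prefixes, it with
  | [], it => (result, it, false)                -- loop ran to completion (else-branch taken)
  | _ :: _, [] => (result, [], true)             -- next(it, None) is None → break
  | p :: ps, x :: rest => pvPhase ps rest (result ++ [p ++ " " ++ x])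

def concatenate_lists_alt (list300 : List String) (list140 : List String) (list160 : List String) : List String :=
  let s1 := pvPhase list140 list300 []
  let s2 := if s1.2.2 then (s1.1, s1.2.1) else
    let t := pvPhase list160 s1.2.1 s1.1
    (t.1, t.2.1)
  s2.1 ++ s2.2                                   -- result.extend(it); return result

-- ===== PRECONDITION & SPEC =====
def Spec_concatenate_lists (list300 : List String) (list140 : List String) (list160 : List String) (out : List String) : Prop := out = concatenate_lists_alt list300 list140 list160
instance (list300 : List String) (list140 : List String) (list160 : List String) (out : List String) : Decidable (Spec_concatenate_lists list300 list140 list160 out) := by unfold Spec_concatenate_lists; infer_instance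

-- ===== CLAIM =====
def Claim_equal_concatenate_lists : Prop := ∀ (list300 : List String) (list140 : List String) (list160 : List String), Dom_concatenate_lists list300 list140 list160 → Spec_concatenate_lists list300 list140 list160 (concatenate_lists list300 list140 list160)

-- ===== LEMMAS AND PROOFS =====

-- A's append-to-result loop over range n is the map of its body over range n.
theorem pv_foldl_range_map (f : Nat → String) (n : Nat) :
    (List.range n).foldl (fun r i => r ++ [f i]) [] = (List.range n).map f := by
  induction n with
  | zero => simp
  | succ n ih => simp [List.range_succ, List.foldl_append, ih]

-- the common zip-style normal form both ports are reduced to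
def pvZipForm (prefixes xs : List String) : List String :=
  (prefixes.zip xs).map (fun px => px.1 ++ " " ++ px.2) ++ xs.drop prefixes.length

theorem pvPhase_eq (ps : List String) (xs acc : List String) :
    pvPhase ps xs acc =
      (acc ++ (ps.zip xs).map (fun px => px.1 ++ " " ++ px.2),
       xs.drop ps.length, decide (xs.length < ps.length)) := by
  induction ps generalizing xs acc with
  | nil => simp [pvPhase]
  | cons p ps ih =>
    cases xs with
    | nil => simp [pvPhase]
    | cons x rest => simp [pvPhase, ih]

theorem pv_zip_append (a b xs : List String) :
    (a ++ b).zip xs = a.zip xs ++ b.zip (xs.drop a.length) := by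
  induction a generalizing xs with
  | nil => simp
  | cons p ps ih =>
    cases xs with
    | nil => simp
    | cons x rest => simp [ih]

theorem alt_eq_zipForm (list300 list140 list160 : List String) :
    concatenate_lists_alt list300 list140 list160 = pvZipForm (list140 ++ list160) list300 := by
  unfold concatenate_lists_alt pvZipForm
  simp only [pvPhase_eq, pv_zip_append]
  by_cases h : list300.length < list140.length
  · have h1 : list300.drop list140.length = [] := by
      apply List.drop_eq_nil_of_le; omega
    simp [h, h1]
    omega
  · have h1 : (list300.drop list140.length).length = list300.length - list140.length := by simp
    simp [h, List.drop_drop]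

theorem a_eq_zipForm (list300 list140 list160 : List String) :
    concatenate_lists list300 list140 list160 = pvZipForm (list140 ++ list160) list300 := by
  unfold concatenate_lists pvZipForm
  rw [pv_foldl_range_map]
  apply List.ext_getElem
  · simp [List.length_zip]
    omega
  · intro i h1 h2
    simp only [List.length_map, List.length_range] at h1
    simp only [List.getElem_map, List.getElem_range]
    by_cases hp : i < list140.length + list160.length
    · rw [List.getElem_append_left (by simp [List.length_zip]; omega)]
      simp only [List.getElem_map, List.getElem_zip]
      by_cases h140 : i < list140.length
      · rw [List.getElem_append_left h140]
        simp [h140, List.getD_eq_getElem?_getD, h1]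
      · rw [List.getElem_append_right (by omega)]
        have h160 : i - list140.length < list160.length := by omega
        simp [h140, h160, List.getD_eq_getElem?_getD, h1]
    · rw [List.getElem_append_right (by simp [List.length_zip]; omega)]
      have h140 : ¬ i < list140.length := by omega
      have h160 : ¬ i - list140.length < list160.length := by omega
      simp only [List.length_map, List.length_zip, List.length_append, List.getElem_drop]
      have : min (list140.length + list160.length) list300.length = list140.length + list160.length := by omega
      simp [h140, h160, this, List.getD_eq_getElem?_getD, h1]
      congr 1
      omega

-- ===== VERDICT =====
theorem concatenate_lists_spec : Claim_equal_concatenate_lists := by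
  intro list300 list140 list160 _
  unfold Spec_concatenate_lists
  rw [a_eq_zipForm, alt_eq_zipForm]
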